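-- pv_equiv track=rewrite | github.com/neo-rs/rsbots | scripts/run_discum_mapping_remote.py | _action_remote_cmd_with_ids
-- ===== SOURCE A (Python) =====
-- import shlex
-- from typing import Any, Dict, List, Optional, Tuple
--
-- def _action_remote_cmd_with_ids(action: str, remote_root: str, ids: Optional[List[str]]) -> str:
--     """
--     Build remote verify/post command, optionally limiting verify to specific channel IDs.
--     """
--     cd_root = f"cd {shlex.quote(remote_root)}"
--     if action == "verify":
--         if ids:
--             return f"{cd_root}; python3 scripts/verify_discum_channel_ids.py " + " ".join(shlex.quote(i) for i in ids)
--         return f"{cd_root}; python3 scripts/verify_discum_channel_ids.py"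
--     if action == "verify-remove":
--         if ids:
--             return f"{cd_root}; python3 scripts/verify_discum_channel_ids.py --remove-failed " + " ".join(shlex.quote(i) for i in ids)
--         return f"{cd_root}; python3 scripts/verify_discum_channel_ids.py --remove-failed"
--     if action == "post":
--         return f"{cd_root}; python3 MWDiscumBot/post_mirror_channel_map.py"
--     if action == "post-no-cleanup":
--         return f"{cd_root}; python3 MWDiscumBot/post_mirror_channel_map.py --no-cleanup"
--     if action == "post-upsert":
--         return f"{cd_root}; python3 MWDiscumBot/post_mirror_channel_map.py --upsert"
--     if action == "refresh":
--         # refresh ignores ids for now (verify -> post chain)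
--         return (
--             f"{cd_root}; "
--             "python3 scripts/verify_discum_channel_ids.py && "
--             "python3 MWDiscumBot/post_mirror_channel_map.py"
--         )
--     raise ValueError(f"Unsupported action: {action}")
-- ===== SOURCE B (Python) =====
-- import string
--
-- # Characters a POSIX shell treats as plain text inside a word.
-- _PLAIN = set(string.ascii_letters + string.digits + "_@%+=:,./-")
--
--
-- def _sh_quote(token):
--     """Single-quote a token for a POSIX shell; plain tokens pass through."""
--     if token and all(c in _PLAIN for c in token):
--         return token
--     return "'" + token.replace("'", "'\"'\"'") + "'"
--
--
-- def _sh_join(tokens):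
--     return " ".join(_sh_quote(t) for t in tokens)
--
--
-- _VERIFY = ["python3", "scripts/verify_discum_channel_ids.py"]
-- _POST = ["python3", "MWDiscumBot/post_mirror_channel_map.py"]
--
-- # Each action is a pipeline: a list of commands (argv token lists) chained with '&&'.
-- _PIPELINES = {
--     "verify": [_VERIFY],
--     "verify-remove": [_VERIFY + ["--remove-failed"]],
--     "post": [_POST],
--     "post-no-cleanup": [_POST + ["--no-cleanup"]],
--     "post-upsert": [_POST + ["--upsert"]],
--     "refresh": [_VERIFY, _POST],
-- }
--
--
-- def _action_remote_cmd_with_ids(action, remote_root, ids):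
--     if action not in _PIPELINES:
--         raise ValueError(f"Unsupported action: {action}")
--     pipeline = [list(cmd) for cmd in _PIPELINES[action]]
--     if ids and action in ("verify", "verify-remove"):
--         pipeline[0].extend(ids)
--     chained = " && ".join(_sh_join(cmd) for cmd in pipeline)
--     return f"{_sh_join(['cd', remote_root])}; {chained}"
-- ===== Notes on version B (the rewrite author's own statement) =====
-- stated objective: alternative
-- what changed: B models each action as a pipeline of argv token lists and renders the command compositionally - every token shell-quoted uniformly by one helper, commands joined with ' && ' and the cd prefix itself rendered from ['cd', remote_root] - instead of A's six-branch if/return chain over preformatted strings with ad-hoc id appending; Pre_ excludes unsupported actions, on which both raise ValueError.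
import Mathlib
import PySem

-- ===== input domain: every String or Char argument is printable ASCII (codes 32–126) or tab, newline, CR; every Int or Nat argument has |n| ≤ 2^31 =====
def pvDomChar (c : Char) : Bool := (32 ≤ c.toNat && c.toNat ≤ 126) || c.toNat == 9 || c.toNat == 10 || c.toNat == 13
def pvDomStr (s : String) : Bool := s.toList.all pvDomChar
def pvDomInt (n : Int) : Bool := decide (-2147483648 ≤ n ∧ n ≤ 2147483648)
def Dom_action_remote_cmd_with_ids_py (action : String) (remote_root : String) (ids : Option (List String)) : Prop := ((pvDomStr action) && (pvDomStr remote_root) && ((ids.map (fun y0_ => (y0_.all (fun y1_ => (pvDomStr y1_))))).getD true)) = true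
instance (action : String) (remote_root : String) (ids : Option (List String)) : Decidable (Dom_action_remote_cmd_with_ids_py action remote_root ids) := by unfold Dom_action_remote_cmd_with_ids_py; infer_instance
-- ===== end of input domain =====

-- B renders each action from a pipeline of argv token lists with shlex.join ('&&'-chained), instead of A's if/return chain over preformatted strings; alternative structure, same cost.


-- shlex.quote, ported by hand (no PySem primitive): exact on ASCII strings.
-- safe chars are re.compile(r'[^\w@%+=:,./-]', re.ASCII): [A-Za-z0-9_@%+=:,./-]
def pvShlexSafeChar (c : Char) : Bool :=
  ('a' ≤ c && c ≤ 'z') || ('A' ≤ c && c ≤ 'Z') || ('0' ≤ c && c ≤ '9') ||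
  c == '_' || c == '@' || c == '%' || c == '+' || c == '=' || c == ':' ||
  c == ',' || c == '.' || c == '/' || c == '-'

def pvShlexQuote (s : String) : String :=
  if s = "" then "''"
  else if s.toList.all pvShlexSafeChar then s
  else "'" ++ String.ofList (s.toList.flatMap (fun c => if c = '\'' then "'\"'\"'".toList else [c])) ++ "'"

-- ===== PORT A =====
-- " ".join(shlex.quote(i) for i in ids)
def pvJoinQuoted (ids : List String) : String :=
  PySem.Str.join " " (ids.map pvShlexQuote)

-- A raises ValueError on an unsupported action; the port returns "" there (excluded by Pre_).
def action_remote_cmd_with_ids_py (action : String) (remote_root : String) (ids : Option (List String)) : String :=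
  let cd_root := "cd " ++ pvShlexQuote remote_root
  if action = "verify" then
    match ids with
    | some l => if l ≠ [] then cd_root ++ "; python3 scripts/verify_discum_channel_ids.py " ++ pvJoinQuoted l
                else cd_root ++ "; python3 scripts/verify_discum_channel_ids.py"
    | none => cd_root ++ "; python3 scripts/verify_discum_channel_ids.py"
  else if action = "verify-remove" then
    match ids with
    | some l => if l ≠ [] then cd_root ++ "; python3 scripts/verify_discum_channel_ids.py --remove-failed " ++ pvJoinQuoted l
                else cd_root ++ "; python3 scripts/verify_discum_channel_ids.py --remove-failed"
    | none => cd_root ++ "; python3 scripts/verify_discum_channel_ids.py --remove-failed"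
  else if action = "post" then cd_root ++ "; python3 MWDiscumBot/post_mirror_channel_map.py"
  else if action = "post-no-cleanup" then cd_root ++ "; python3 MWDiscumBot/post_mirror_channel_map.py --no-cleanup"
  else if action = "post-upsert" then cd_root ++ "; python3 MWDiscumBot/post_mirror_channel_map.py --upsert"
  else if action = "refresh" then
    cd_root ++ "; " ++ "python3 scripts/verify_discum_channel_ids.py && " ++ "python3 MWDiscumBot/post_mirror_channel_map.py"
  else ""  -- raise ValueError(f"Unsupported action: {action}")

-- ===== PORT B =====
def pvVERIFY : List String := ["python3", "scripts/verify_discum_channel_ids.py"]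
def pvPOST : List String := ["python3", "MWDiscumBot/post_mirror_channel_map.py"]

def pvPipelines : PySem.Dict String (List (List String)) := PySem.Dict.ofList
  [ ("verify", [pvVERIFY]),
    ("verify-remove", [pvVERIFY ++ ["--remove-failed"]]),
    ("post", [pvPOST]),
    ("post-no-cleanup", [pvPOST ++ ["--no-cleanup"]]),
    ("post-upsert", [pvPOST ++ ["--upsert"]]),
    ("refresh", [pvVERIFY, pvPOST]) ]

-- B's own quoting helper (_sh_quote): same safe-character class, ported by hand; exact on ASCII.
-- token.replace("'", quint) of a one-char pattern is ported as per-character expansion; exact.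
def pvShQuote (s : String) : String :=
  if s ≠ "" && s.toList.all pvShlexSafeChar then s
  else "'" ++ String.ofList (s.toList.flatMap (fun c => if c = '\'' then "'\"'\"'".toList else [c])) ++ "'"

def pvShJoin (cmd : List String) : String :=
  PySem.Str.join " " (cmd.map pvShQuote)

def action_remote_cmd_with_ids_py_alt (action : String) (remote_root : String) (ids : Option (List String)) : String :=
  match PySem.Dict.get? pvPipelines action with
  | none => ""  -- raise ValueError(f"Unsupported action: {action}")
  | some pl =>
    let pipeline :=
      match ids with
      | some l =>
        if l ≠ [] && (action = "verify" || action = "verify-remove") then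
          match pl with
          | [] => []
          | c :: rest => (c ++ l) :: rest
        else pl
      | none => pl
    let chained := PySem.Str.join " && " (pipeline.map pvShJoin)
    pvShJoin ["cd", remote_root] ++ "; " ++ chained

-- ===== PRECONDITION & SPEC =====
-- Pre_ excludes exactly the unsupported actions, on which A raises ValueError (B raises it too).
def Pre_action_remote_cmd_with_ids_py (action : String) (remote_root : String) (ids : Option (List String)) : Prop :=
  action = "verify" ∨ action = "verify-remove" ∨ action = "post" ∨
  action = "post-no-cleanup" ∨ action = "post-upsert" ∨ action = "refresh"
instance (action : String) (remote_root : String) (ids : Option (List String)) : Decidable (Pre_action_remote_cmd_with_ids_py action remote_root ids) := by unfold Pre_action_remote_cmd_with_ids_py; infer_instance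

def pvWitness_action_remote_cmd_with_ids_py : String × String × Option (List String) := ("verify", "/srv/x y", some ["1", "a'b"])

def Spec_action_remote_cmd_with_ids_py (action : String) (remote_root : String) (ids : Option (List String)) (out : String) : Prop := out = action_remote_cmd_with_ids_py_alt action remote_root ids
instance (action : String) (remote_root : String) (ids : Option (List String)) (out : String) : Decidable (Spec_action_remote_cmd_with_ids_py action remote_root ids out) := by unfold Spec_action_remote_cmd_with_ids_py; infer_instance

-- ===== CLAIM (what is proved, stated in full; the proofs are below) =====
def Claim_equal_action_remote_cmd_with_ids_py : Prop := ∀ (action : String) (remote_root : String) (ids : Option (List String)), Dom_action_remote_cmd_with_ids_py action remote_root ids → Pre_action_remote_cmd_with_ids_py action remote_root ids → Spec_action_remote_cmd_with_ids_py action remote_root ids (action_remote_cmd_with_ids_py action remote_root ids)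

-- ===== LEMMAS AND PROOFS =====

-- B's _sh_quote agrees with shlex.quote on every string (empty strings land in the quoted branch either way).
theorem pvShQuote_eq (s : String) : pvShQuote s = pvShlexQuote s := by
  by_cases h : s = ""
  · subst h; decide
  · simp [pvShQuote, pvShlexQuote, h]

-- ===== VERDICT (by name: the statement is the Claim_ definition above) =====
theorem action_remote_cmd_with_ids_py_spec : Claim_equal_action_remote_cmd_with_ids_py := by
  intro action remote_root ids _ hpre
  unfold Spec_action_remote_cmd_with_ids_py action_remote_cmd_with_ids_py action_remote_cmd_with_ids_py_alt
  have g1 : PySem.Dict.get? pvPipelines "verify" = some [pvVERIFY] := by decide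
  have g2 : PySem.Dict.get? pvPipelines "verify-remove" = some [pvVERIFY ++ ["--remove-failed"]] := by decide
  have g3 : PySem.Dict.get? pvPipelines "post" = some [pvPOST] := by decide
  have g4 : PySem.Dict.get? pvPipelines "post-no-cleanup" = some [pvPOST ++ ["--no-cleanup"]] := by decide
  have g5 : PySem.Dict.get? pvPipelines "post-upsert" = some [pvPOST ++ ["--upsert"]] := by decide
  have g6 : PySem.Dict.get? pvPipelines "refresh" = some [pvVERIFY, pvPOST] := by decide
  have q1 : pvShlexQuote "cd" = "cd" := by decide
  have q2 : pvShlexQuote "python3" = "python3" := by decide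
  have q3 : pvShlexQuote "scripts/verify_discum_channel_ids.py" = "scripts/verify_discum_channel_ids.py" := by decide
  have q4 : pvShlexQuote "--remove-failed" = "--remove-failed" := by decide
  have q5 : pvShlexQuote "MWDiscumBot/post_mirror_channel_map.py" = "MWDiscumBot/post_mirror_channel_map.py" := by decide
  have q6 : pvShlexQuote "--no-cleanup" = "--no-cleanup" := by decide
  have q7 : pvShlexQuote "--upsert" = "--upsert" := by decide
  have hc : (String.toList ∘ pvShQuote) = (String.toList ∘ pvShlexQuote) :=
    funext fun s => by rw [Function.comp_apply, Function.comp_apply, pvShQuote_eq]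
  rcases hpre with h | h | h | h | h | h <;> subst h <;>
    rcases ids with _ | (_ | ⟨x, l⟩) <;>
    · refine String.toList_inj.mp ?_
      simp [g1, g2, g3, g4, g5, g6, pvShJoin, pvShQuote_eq, hc, pvJoinQuoted, pvVERIFY, pvPOST,
        PySem.Str.join, PySem.Chars.join_cons_cons, PySem.Chars.join_singleton,
        q1, q2, q3, q4, q5, q6, q7]
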